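-- pv_equiv track=rewrite | github.com/nitvishn/ProjectEuler | p062.py | passesTest
-- ===== SOURCE A (Python) =====
-- def isPermutation(n_int, k_int):
--     n = str(n_int)
--     k = str(k_int)
--     if len(n) != len(k):
--         return False
--     for char in n:
--         if n.count(char) != k.count(char):
--             return False
--     return True
--
-- def passesTest(n, S):
--     count = 0
--     for num in S:
--         if isPermutation(num, n):
--             count += 1
--             if count > 5:
--                 break
--     return count
-- ===== SOURCE B (Python) =====
-- def passesTest(n, S):
--     key = sorted(str(n))
--     count = 0
--     for num in S:
--         if sorted(str(num)) == key:
--             count += 1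
--             if count > 5:
--                 break
--     return count
-- ===== Notes on version B (the rewrite author's own statement) =====
-- stated objective: simpler
-- what changed: Replaces the helper's per-character count-matching scan (length check plus a loop comparing n.count(char) to k.count(char)) with one canonical key sorted(str(n)) computed once before the loop and a single sorted-string comparison per element, keeping the exact count>5 break.
import Mathlib
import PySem

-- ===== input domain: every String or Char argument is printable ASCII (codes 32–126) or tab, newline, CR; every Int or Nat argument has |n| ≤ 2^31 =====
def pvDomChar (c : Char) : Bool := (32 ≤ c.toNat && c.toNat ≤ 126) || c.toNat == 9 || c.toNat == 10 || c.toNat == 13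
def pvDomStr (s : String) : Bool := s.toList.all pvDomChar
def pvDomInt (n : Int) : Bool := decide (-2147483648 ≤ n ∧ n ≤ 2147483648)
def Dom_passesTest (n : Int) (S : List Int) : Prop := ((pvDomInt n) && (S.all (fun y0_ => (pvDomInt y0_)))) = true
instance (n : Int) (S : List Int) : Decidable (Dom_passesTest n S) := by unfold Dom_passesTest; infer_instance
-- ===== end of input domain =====

-- B computes sorted(str(n)) once as a canonical key and compares each element's
-- sorted digit string against it, instead of A's per-character count-matching scan; same break at count > 5.

-- ===== PORT A =====
-- 'for char in n: if n.count(char) != k.count(char): return False' of isPermutation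
def isPermLoop (n k : List Char) : List Char → Bool
  | [] => true
  | c :: rest =>
    if PySem.Chars.count n [c] ≠ PySem.Chars.count k [c] then false else isPermLoop n k rest

def isPermutationPy (nI kI : Int) : Bool :=
  let n := PySem.Int.toChars nI
  let k := PySem.Int.toChars kI
  if n.length ≠ k.length then false
  else isPermLoop n k n

-- 'for num in S: if isPermutation(num, n): count += 1; if count > 5: break'
def passesLoopA (n : Int) : List Int → Int → Int
  | [], count => count
  | num :: rest, count =>
    if isPermutationPy num n then
      if count + 1 > 5 then count + 1 else passesLoopA n rest (count + 1)
    else passesLoopA n rest count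

def passesTest (n : Int) (S : List Int) : Int := passesLoopA n S 0

-- ===== PORT B =====
-- 'for num in S: if sorted(str(num)) == key: count += 1; if count > 5: break'
def passesLoopB (key : List Char) : List Int → Int → Int
  | [], count => count
  | num :: rest, count =>
    if PySem.List.sorted (PySem.Int.toChars num) (fun c => c) false = key then
      if count + 1 > 5 then count + 1 else passesLoopB key rest (count + 1)
    else passesLoopB key rest count

def passesTest_alt (n : Int) (S : List Int) : Int :=
  passesLoopB (PySem.List.sorted (PySem.Int.toChars n) (fun c => c) false) S 0

-- ===== PRECONDITION & SPEC =====
def Spec_passesTest (n : Int) (S : List Int) (out : Int) : Prop := out = passesTest_alt n S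
instance (n : Int) (S : List Int) (out : Int) : Decidable (Spec_passesTest n S out) := by unfold Spec_passesTest; infer_instance

-- ===== CLAIM (what is proved, stated in full; the proofs are below) =====
def Claim_equal_passesTest : Prop := ∀ (n : Int) (S : List Int), Dom_passesTest n S → Spec_passesTest n S (passesTest n S)

-- ===== LEMMAS AND PROOFS =====

-- Python s.count(c) for a single character c is the character count
theorem count_go_single (c : Char) : ∀ (l : List Char) (fuel acc : Nat), l.length ≤ fuel →
    PySem.Chars.count.go [c] fuel l acc = acc + l.count c := by
  intro l
  induction l with
  | nil => intro fuel acc h; cases fuel <;> simp [PySem.Chars.count.go]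
  | cons x t ih =>
    intro fuel acc h
    cases fuel with
    | zero => simp at h
    | succ f =>
      rw [PySem.Chars.count.go]
      by_cases hx : x = c
      · subst hx
        simp [List.isPrefixOf, ih f (acc+1) (by simpa using h)]
        omega
      · simp [List.isPrefixOf, hx, Ne.symm hx, ih f acc (by simpa using h)]

theorem count_single (s : List Char) (c : Char) : PySem.Chars.count s [c] = s.count c := by
  simp [PySem.Chars.count, count_go_single c s s.length 0 le_rfl]

theorem isPermLoop_true (n k : List Char) (l : List Char) :
    isPermLoop n k l = true ↔ ∀ c ∈ l, n.count c = k.count c := by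
  induction l with
  | nil => simp [isPermLoop]
  | cons c rest ih =>
    by_cases h : PySem.Chars.count n [c] = PySem.Chars.count k [c]
    · simp only [count_single] at h
      simp [isPermLoop, count_single, h, ih]
    · simp only [count_single] at h
      simp [isPermLoop, count_single, h]

theorem perm_of_length_count (a b : List Char)
    (hl : a.length = b.length) (hc : ∀ c ∈ a, a.count c = b.count c) : a.Perm b := by
  have hsub : a.Subperm b := by
    rw [List.subperm_ext_iff]
    intro c hc'
    exact (hc c hc').le
  exact hsub.perm_of_length_le (le_of_eq hl.symm)

theorem isPermutationPy_eq_sorted (num n : Int) :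
    isPermutationPy num n =
      decide (PySem.List.sorted (PySem.Int.toChars num) (fun c => c) false
            = PySem.List.sorted (PySem.Int.toChars n) (fun c => c) false) := by
  set a := PySem.Int.toChars num with ha
  set b := PySem.Int.toChars n with hb
  rw [Bool.eq_iff_iff]
  rw [decide_eq_true_iff, PySem.List.sorted_id_eq_sorted_id_iff_perm]
  constructor
  · intro h
    unfold isPermutationPy at h
    rw [← ha, ← hb] at h
    by_cases hl : a.length = b.length
    · simp only [hl, ne_eq, not_true_eq_false, if_false] at h
      exact perm_of_length_count a b hl ((isPermLoop_true a b a).1 (by simpa using h))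
    · simp [hl] at h
  · intro hp
    unfold isPermutationPy
    rw [← ha, ← hb]
    simp only [hp.length_eq, ne_eq, not_true_eq_false, if_false]
    exact (isPermLoop_true a b a).2 (fun c _ => hp.count_eq c)

theorem loops_eq (n : Int) (S : List Int) : ∀ count : Int,
    passesLoopA n S count
      = passesLoopB (PySem.List.sorted (PySem.Int.toChars n) (fun c => c) false) S count := by
  induction S with
  | nil => intro count; simp [passesLoopA, passesLoopB]
  | cons num rest ih =>
    intro count
    simp only [passesLoopA, passesLoopB, isPermutationPy_eq_sorted num n]
    by_cases h : PySem.List.sorted (PySem.Int.toChars num) (fun c => c) false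
        = PySem.List.sorted (PySem.Int.toChars n) (fun c => c) false
    · simp [h, ih]
    · simp [h, ih]

-- ===== VERDICT (by name: the statement is the Claim_ definition above) =====
theorem passesTest_spec : Claim_equal_passesTest := by
  intro n S _
  unfold Spec_passesTest passesTest passesTest_alt
  exact loops_eq n S 0
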